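-- pv_equiv track=rewrite | github.com/pabloschwarzenberg/grader | tema4_ej3/tema4_ej3_d55eaf8506f9046a88b8730781830194.py | jerigonzo
-- ===== SOURCE A (Python) =====
-- def jerigonzo(string):
--     string=list(string)
--     vocales=["a","e","i","o","u"]
--     jerigonzo=["apa","epe","ipi","opo","upu"]
--     i=0
--     j=0
--     while i<len(string):
--       if string[i]==vocales[j]:
--         string[i]=jerigonzo[j]
--         j=0
--         i=i+1
--       elif j<4:
--         j=j+1
--       elif j==4:
--         i=i+1
--         j=0
--     string="".join(string)
--     return string
-- ===== SOURCE B (Python) =====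
-- def jerigonzo(string):
--     for vocal, silaba in zip("aeiou", ["apa", "epe", "ipi", "opo", "upu"]):
--         string = string.replace(vocal, silaba)
--     return string
-- ===== Notes on version B (the rewrite author's own statement) =====
-- stated objective: simpler
-- what changed: Replaces A's index-walk with a secondary vowel-scan index and in-place list cell rewriting by one whole-string str.replace pass per vowel (safe because each syllable introduces no other vowel).
import Mathlib
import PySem

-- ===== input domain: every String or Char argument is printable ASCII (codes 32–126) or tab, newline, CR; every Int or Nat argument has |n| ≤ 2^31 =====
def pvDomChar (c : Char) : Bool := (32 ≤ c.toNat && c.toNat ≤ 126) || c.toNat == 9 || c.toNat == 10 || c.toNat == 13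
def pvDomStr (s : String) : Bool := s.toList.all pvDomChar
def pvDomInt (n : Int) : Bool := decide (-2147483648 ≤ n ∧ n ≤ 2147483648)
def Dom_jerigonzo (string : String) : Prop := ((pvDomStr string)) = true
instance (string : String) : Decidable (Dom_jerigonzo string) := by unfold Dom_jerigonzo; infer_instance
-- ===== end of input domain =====

-- B replaces A's per-character index walk (with a secondary vowel-scan index and in-place
-- cell rewriting) by one whole-string replace pass per vowel; objective: simpler.

-- ===== PORT A =====
def vocalesA : List String := ["a", "e", "i", "o", "u"]
def jerA : List String := ["apa", "epe", "ipi", "opo", "upu"]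

-- the while loop of A: state = the list 'string', indices i and j
def loopA (l : List String) (i j : Nat) : List String :=
  if _h : i < l.length then
    if l.getD i "" == vocalesA.getD j "" then
      loopA (l.set i (jerA.getD j "")) (i + 1) 0
    else if j < 4 then
      loopA l i (j + 1)
    else
      loopA l (i + 1) 0
  else l
termination_by (l.length - i, 4 - j)
decreasing_by
  · simp only [List.length_set]; left; omega
  · right; omega
  · left; omega

def jerigonzo (string : String) : String :=
  PySem.Str.join "" (loopA (string.toList.map (fun c => String.ofList [c])) 0 0)

-- ===== PORT B =====
def jerigonzo_alt (string : String) : String :=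
  [('a', "apa"), ('e', "epe"), ('i', "ipi"), ('o', "opo"), ('u', "upu")].foldl
    (fun s p => PySem.Str.replace s (String.ofList [p.1]) p.2) string

-- ===== PRECONDITION & SPEC =====
def Spec_jerigonzo (string : String) (out : String) : Prop := out = jerigonzo_alt string
instance (string : String) (out : String) : Decidable (Spec_jerigonzo string out) := by unfold Spec_jerigonzo; infer_instance

-- ===== CLAIM (what is proved, stated in full; the proofs are below) =====
def Claim_equal_jerigonzo : Prop := ∀ (string : String), Dom_jerigonzo string → Spec_jerigonzo string (jerigonzo string)

-- ===== LEMMAS AND PROOFS =====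

-- the per-character substitution both sides compute
def subC (c : Char) : List Char :=
  if c = 'a' then "apa".toList else if c = 'e' then "epe".toList
  else if c = 'i' then "ipi".toList else if c = 'o' then "opo".toList
  else if c = 'u' then "upu".toList else [c]

lemma loopA_done (l : List String) (i j : Nat) (h : ¬ i < l.length) :
    loopA l i j = l := by
  rw [loopA]; simp [h]

-- A's loop, characterised: from position ps.length, list = processed prefix ps ++ raw singleton chars
lemma loopA_spec (cs : List Char) (ps : List String) :
    loopA (ps ++ cs.map (fun c => String.ofList [c])) ps.length 0
      = ps ++ cs.map (fun c => String.ofList (subC c)) := by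
  induction cs generalizing ps with
  | nil => simp [loopA_done]
  | cons c t ih =>
    have hget : ∀ (j : Nat) (x : String) (r : List String),
        (ps ++ x :: r).getD ps.length "" = x := by
      intro j x r
      rw [List.getD_eq_getElem?_getD, List.getElem?_append_right (le_refl _)]
      simp
    have hset : ∀ (y : String), (ps ++ String.ofList [c] :: t.map (fun c => String.ofList [c])).set ps.length y
        = (ps ++ [y]) ++ t.map (fun c => String.ofList [c]) := by
      intro y
      rw [List.set_append_right _ _ (le_refl _)]
      simp
    have hlen : ps.length < (ps ++ String.ofList [c] :: t.map (fun c => String.ofList [c])).length := by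
      simp
    have step : ∀ y, y = String.ofList (subC c) →
        loopA ((ps ++ [y]) ++ t.map (fun c => String.ofList [c])) (ps.length + 1) 0
          = ps ++ (c :: t).map (fun c => String.ofList (subC c)) := by
      intro y hy
      have := ih (ps ++ [y])
      simp only [List.length_append, List.length_cons, List.length_nil] at this
      rw [this, hy]
      simp
    by_cases ha : c = 'a'
    · subst ha
      rw [loopA]; simp only [List.map_cons, hlen, dif_pos, hget 0]
      rw [if_pos (by decide), hset]
      refine step _ ?_
      decide
    all_goals by_cases he : c = 'e'
    · subst he
      rw [loopA]; simp only [List.map_cons, hlen, dif_pos, hget 0]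
      rw [if_neg (by decide), if_pos (by decide)]
      rw [loopA]; simp only [List.map_cons, hlen, dif_pos, hget 1]
      rw [if_pos (by decide), hset]
      refine step _ ?_
      decide
    all_goals by_cases hi : c = 'i'
    · subst hi
      rw [loopA]; simp only [List.map_cons, hlen, dif_pos, hget 0]
      rw [if_neg (by decide), if_pos (by decide)]
      rw [loopA]; simp only [List.map_cons, hlen, dif_pos, hget 1]
      rw [if_neg (by decide), if_pos (by decide)]
      rw [loopA]; simp only [List.map_cons, hlen, dif_pos, hget 2]
      rw [if_pos (by decide), hset]
      refine step _ ?_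
      decide
    all_goals by_cases ho : c = 'o'
    · subst ho
      rw [loopA]; simp only [List.map_cons, hlen, dif_pos, hget 0]
      rw [if_neg (by decide), if_pos (by decide)]
      rw [loopA]; simp only [List.map_cons, hlen, dif_pos, hget 1]
      rw [if_neg (by decide), if_pos (by decide)]
      rw [loopA]; simp only [List.map_cons, hlen, dif_pos, hget 2]
      rw [if_neg (by decide), if_pos (by decide)]
      rw [loopA]; simp only [List.map_cons, hlen, dif_pos, hget 3]
      rw [if_pos (by decide), hset]
      refine step _ ?_
      decide
    all_goals by_cases hu : c = 'u'
    · subst hu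
      rw [loopA]; simp only [List.map_cons, hlen, dif_pos, hget 0]
      rw [if_neg (by decide), if_pos (by decide)]
      rw [loopA]; simp only [List.map_cons, hlen, dif_pos, hget 1]
      rw [if_neg (by decide), if_pos (by decide)]
      rw [loopA]; simp only [List.map_cons, hlen, dif_pos, hget 2]
      rw [if_neg (by decide), if_pos (by decide)]
      rw [loopA]; simp only [List.map_cons, hlen, dif_pos, hget 3]
      rw [if_neg (by decide), if_pos (by decide)]
      rw [loopA]; simp only [List.map_cons, hlen, dif_pos, hget 4]
      rw [if_pos (by decide), hset]
      refine step _ ?_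
      decide
    · -- not a vowel: five failing comparisons, then i+1, j=0
      have hne : ∀ v : String, v ∈ vocalesA → ¬ (String.ofList [c] == v) = true := by
        intro v hv
        fin_cases hv <;>
          simp only [beq_iff_eq, String.ext_iff, String.toList_ofList] <;>
          simp_all
      rw [loopA]; simp only [List.map_cons, hlen, dif_pos, hget 0]
      rw [if_neg (hne _ (by decide)), if_pos (by decide)]
      rw [loopA]; simp only [List.map_cons, hlen, dif_pos, hget 1]
      rw [if_neg (hne _ (by decide)), if_pos (by decide)]
      rw [loopA]; simp only [List.map_cons, hlen, dif_pos, hget 2]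
      rw [if_neg (hne _ (by decide)), if_pos (by decide)]
      rw [loopA]; simp only [List.map_cons, hlen, dif_pos, hget 3]
      rw [if_neg (hne _ (by decide)), if_pos (by decide)]
      rw [loopA]; simp only [List.map_cons, hlen, dif_pos, hget 4]
      rw [if_neg (hne _ (by decide)), if_neg (by decide)]
      have : ps ++ String.ofList [c] :: t.map (fun c => String.ofList [c])
          = (ps ++ [String.ofList [c]]) ++ t.map (fun c => String.ofList [c]) := by simp
      rw [this]
      refine step _ ?_
      simp [subC, ha, he, hi, ho, hu]

-- single-character replace, characterised via its fuel loop
lemma replace_go_single (v : Char) (new : List Char) :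
    ∀ (l acc : List Char) (fuel : Nat), l.length ≤ fuel →
    PySem.Chars.replace.go [v] new fuel l acc
      = acc.reverse ++ l.flatMap (fun c => if c = v then new else [c]) := by
  intro l
  induction l with
  | nil => intro acc fuel _; cases fuel <;> simp [PySem.Chars.replace.go]
  | cons c t ih =>
    intro acc fuel hf
    cases fuel with
    | zero => simp at hf
    | succ n =>
      rw [PySem.Chars.replace.go]
      by_cases hc : c = v
      · subst hc
        rw [if_pos (by simp [List.isPrefixOf])]
        simp only [List.length_cons, List.length_nil, List.drop_succ_cons, List.drop_zero,
          Nat.zero_add]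
        rw [ih _ n (by simpa using hf)]
        simp
      · rw [if_neg (by simp only [List.isPrefixOf, Bool.and_eq_true, beq_iff_eq,
            List.isPrefixOf_nil_left, and_true]; exact fun h => hc h.symm)]
        rw [ih _ n (by simpa using hf)]
        simp [hc]

lemma replace_single (v : Char) (new s : List Char) :
    PySem.Chars.replace s [v] new = s.flatMap (fun c => if c = v then new else [c]) := by
  rw [PySem.Chars.replace]
  rw [if_neg (by simp)]
  exact replace_go_single v new s [] s.length (le_refl _)

-- the join with empty separator is flatten
lemma join_empty (l : List (List Char)) : PySem.Chars.join [] l = l.flatten := by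
  induction l with
  | nil => simp [PySem.Chars.join_nil]
  | cons a t ih =>
    cases t with
    | nil => simp [PySem.Chars.join_singleton]
    | cons b r => rw [PySem.Chars.join_cons_cons]; simp [ih]

lemma alt_toList (s : String) :
    (jerigonzo_alt s).toList = s.toList.flatMap subC := by
  unfold jerigonzo_alt
  simp only [List.foldl_cons, List.foldl_nil]
  have h : ∀ (v : Char) (new t : String),
      (PySem.Str.replace t (String.ofList [v]) new).toList
        = t.toList.flatMap (fun c => if c = v then new.toList else [c]) := by
    intro v new t
    rw [PySem.Str.toList_replace]
    simpa using replace_single v new.toList t.toList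
  rw [h, h, h, h, h]
  induction s.toList with
  | nil => simp
  | cons c t ih =>
    simp only [List.flatMap_cons, List.flatMap_append, ih]
    congr 1
    by_cases ha : c = 'a'
    · subst ha; decide
    all_goals by_cases he : c = 'e'
    · subst he; decide
    all_goals by_cases hi : c = 'i'
    · subst hi; decide
    all_goals by_cases ho : c = 'o'
    · subst ho; decide
    all_goals by_cases hu : c = 'u'
    · subst hu; decide
    · simp [subC, ha, he, hi, ho, hu]

lemma a_toList (s : String) :
    (jerigonzo s).toList = s.toList.flatMap subC := by
  unfold jerigonzo
  have := loopA_spec s.toList []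
  simp only [List.nil_append, List.length_nil] at this
  rw [this]
  rw [PySem.Str.toList_join]
  simp only [String.toList_empty]
  rw [List.map_map, join_empty]
  simp only [Function.comp_def, String.toList_ofList]
  exact List.flatMap_def.symm

-- ===== VERDICT (by name: the statement is the Claim_ definition above) =====
theorem jerigonzo_spec : Claim_equal_jerigonzo := by
  intro s _
  unfold Spec_jerigonzo
  have h := (a_toList s).trans (alt_toList s).symm
  exact String.ext h
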